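-- pv_equiv track=rewrite | github.com/ljz3/CSCA08-A3 | a3/club_functions.py | get_last_to_first
-- ===== SOURCE A (Python) =====
-- from typing import List, Tuple, Dict, TextIO
--
-- def get_last_to_first(
--         person_to_friends: Dict[str, List[str]]) -> Dict[str, List[str]]:
--     """Return a "last name to first name(s)" dictionary with the people
--     from the "person to friends" dictionary person_to_friends.
--
--     >>> get_last_to_first(P2F) == {
--     ...    'Katsopolis': ['Jesse'],
--     ...    'Tanner': ['Danny R', 'Michelle', 'Stephanie J'],
--     ...    'Gladstone': ['Joey'],
--     ...    'Donaldson-Katsopolis': ['Rebecca'],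
--     ...    'Gibbler': ['Kimmy'],
--     ...    'Tanner-Fuller': ['DJ']}
--     True
--
--     """
--     first_to_last = {}
--
--     for person in person_to_friends:
--         for friend in person_to_friends[person]:
--             first = friend[:friend.rfind(" ")]
--             last = friend[friend.rfind(" ") + 1:]
--             if last not in first_to_last:
--                 first_to_last[last] = []
--             if first not in first_to_last[last]:
--                 first_to_last[last].append(first)
--         first = person[:person.rfind(" ")]
--         last = person[person.rfind(" ") + 1:]
--         if last not in first_to_last:
--             first_to_last[last] = []
--         if first not in first_to_last[last]:
--             first_to_last[last].append(first)
--
--     for last in first_to_last: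
--         first_to_last[last].sort()
--
--     return first_to_last
-- ===== SOURCE B (Python) =====
-- def get_last_to_first(person_to_friends):
--     # Collect every (last, first) pair, sort them all once, then one linear
--     # pass appends firsts into pre-seeded buckets, skipping consecutive
--     # duplicates: no per-key sort and no membership scans.
--     pairs = []
--     for person, friends in person_to_friends.items():
--         for name in friends + [person]:
--             idx = name.rfind(" ")
--             pairs.append((name[idx + 1:], name[:idx]))
--     result = {last: [] for last, _ in pairs}
--     prev = None
--     for pair in sorted(pairs):
--         if pair != prev:
--             result[pair[0]].append(pair[1])
--             prev = pair
--     return result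
-- ===== Notes on version B (the rewrite author's own statement) =====
-- stated objective: alternative
-- what changed: A's incremental grouping (dict of lists built with per-name membership-scan dedup, then a per-key sort) is replaced by one global sort of all (last, first) pairs followed by a single linear pass that appends firsts into pre-seeded buckets, skipping consecutive duplicate pairs.
import Mathlib
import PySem

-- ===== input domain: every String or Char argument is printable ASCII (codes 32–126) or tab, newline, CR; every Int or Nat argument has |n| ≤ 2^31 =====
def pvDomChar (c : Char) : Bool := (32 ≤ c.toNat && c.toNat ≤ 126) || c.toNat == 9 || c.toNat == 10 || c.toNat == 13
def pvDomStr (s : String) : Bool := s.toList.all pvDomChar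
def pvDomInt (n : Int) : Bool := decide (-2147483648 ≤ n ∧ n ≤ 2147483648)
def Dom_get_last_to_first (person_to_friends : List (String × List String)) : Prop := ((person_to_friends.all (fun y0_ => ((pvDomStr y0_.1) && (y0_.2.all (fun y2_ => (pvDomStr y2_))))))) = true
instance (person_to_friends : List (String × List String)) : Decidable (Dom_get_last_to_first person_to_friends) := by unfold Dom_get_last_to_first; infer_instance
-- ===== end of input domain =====

-- B replaces A's incremental grouping (per-name membership-scan dedup into a
-- dict of lists, then a per-key sort) by one global sort of all (last, first)
-- pairs followed by a single linear pass that appends into pre-seeded buckets,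
-- skipping consecutive duplicate pairs.

-- ===== PORT A =====
-- the four repeated Python lines (split name, insert [] if key absent, append first if new);
-- A's source contains this block verbatim twice (for friend and for person)
def pvStepA (d : PySem.Dict String (List String)) (name : String) : PySem.Dict String (List String) :=
  let first := PySem.Str.slice name none (some (PySem.Str.rfind name " "))
  let last := PySem.Str.slice name (some (PySem.Str.rfind name " " + 1)) none
  let d1 := if d.contains last then d else d.insert last []
  if (d1.getD last []).contains first then d1 else d1.insert last (d1.getD last [] ++ [first])

def get_last_to_first (person_to_friends : List (String × List String)) : List (String × List String) :=
  -- first_to_last = {}; for person in d: for friend in d[person]: …; then the person block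
  let ftl := person_to_friends.foldl (fun acc pr => pvStepA (pr.2.foldl pvStepA acc) pr.1) PySem.Dict.empty
  -- for last in first_to_last: first_to_last[last].sort()
  let ftl2 := ftl.keys.foldl (fun d last => d.modify last [] (fun l => PySem.List.sorted l (fun x => x) false)) ftl
  ftl2.items

-- ===== PORT B =====
-- idx = name.rfind(" "); the pair (name[idx+1:], name[:idx])
def pvSplit (name : String) : String × String :=
  (PySem.Str.slice name (some (PySem.Str.rfind name " " + 1)) none,
   PySem.Str.slice name none (some (PySem.Str.rfind name " ")))

-- one step of B's final pass: if pair != prev: result[pair[0]].append(pair[1]); prev = pair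
-- (pair[0] is always a pre-seeded key of result, so Dict.modify is exactly the Python append)
def pvStepPrev (st : PySem.Dict String (List String) × Option (String × String))
    (p : String × String) : PySem.Dict String (List String) × Option (String × String) :=
  if some p ≠ st.2 then (st.1.modify p.1 [] (fun l => l ++ [p.2]), some p) else st

def get_last_to_first_alt (person_to_friends : List (String × List String)) : List (String × List String) :=
  let pairs := person_to_friends.foldl
    (fun acc pr => (pr.2 ++ [pr.1]).foldl (fun a n => a ++ [pvSplit n]) acc) []
  -- result = {last: [] for last, _ in pairs}
  let result := pairs.foldl (fun d p => d.insert p.1 ([] : List String)) PySem.Dict.empty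
  -- sorted(pairs): Python sorts tuples of strings, i.e. by the two components lexicographically
  let fin := (PySem.List.sorted2 pairs Prod.fst Prod.snd false).foldl pvStepPrev (result, none)
  fin.1.items

-- ===== PRECONDITION & SPEC =====
def Spec_get_last_to_first (person_to_friends : List (String × List String)) (out : List (String × List String)) : Prop := out = get_last_to_first_alt person_to_friends
instance (person_to_friends : List (String × List String)) (out : List (String × List String)) : Decidable (Spec_get_last_to_first person_to_friends out) := by unfold Spec_get_last_to_first; infer_instance

-- ===== CLAIM (what is proved, stated in full; the proofs are below) =====
def Claim_equal_get_last_to_first : Prop := ∀ (person_to_friends : List (String × List String)), Dom_get_last_to_first person_to_friends → Spec_get_last_to_first person_to_friends (get_last_to_first person_to_friends)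

-- ===== LEMMAS AND PROOFS =====

-- proof-side names: the flattened name list, its (last, first) pairs
def pvNames (pf : List (String × List String)) : List String :=
  pf.foldl (fun acc pr => (acc ++ pr.2) ++ [pr.1]) []

def pvPairs (pf : List (String × List String)) : List (String × String) :=
  (pvNames pf).map pvSplit

-- the first names of the pairs whose last name is L, in order
def pvFirsts (L : String) (ps : List (String × String)) : List String :=
  (ps.filter (fun p => p.1 == L)).map (fun p => p.2)

-- A's per-name update seen as a set-valued grouping step
def pvStepSet (d : PySem.Dict String (List String)) (name : String) : PySem.Dict String (List String) :=
  d.modify (pvSplit name).1 [] (fun s => PySem.Set.add s (pvSplit name).2)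

-- the pairs B's final pass actually appends (consecutive-duplicate skip)
def pvKept (prev : Option (String × String)) : List (String × String) → List (String × String)
  | [] => []
  | p :: ps => if some p = prev then pvKept prev ps else p :: pvKept (some p) ps

-- ---- A-side characterisation ----

-- A's nested loops process exactly the flattened name sequence (friends, then the person, per entry)
theorem pv_flatten_foldl (pf : List (String × List String)) (d : PySem.Dict String (List String)) :
    pf.foldl (fun acc pr => pvStepA (pr.2.foldl pvStepA acc) pr.1) d
      = (pvNames pf).foldl pvStepA d := by
  unfold pvNames
  rw [show (fun (acc : List String) (pr : String × List String) => (acc ++ pr.2) ++ [pr.1])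
        = fun acc pr => acc ++ (pr.2 ++ [pr.1]) from by funext a p; simp]
  rw [PySem.List.foldl_append_eq_flatMap, List.nil_append, List.foldl_flatMap]
  simp [List.foldl_append]

-- re-inserting the value a key already holds changes nothing (distinct keys)
theorem pv_insert_getD_self (d : PySem.Dict String (List String)) (k : String)
    (h : d.keys.Nodup) (hc : d.contains k = true) :
    d.insert k (d.getD k []) = d := by
  apply PySem.Dict.ext
  rw [PySem.Dict.items_insert_of_contains d _ hc]
  conv_rhs => rw [← List.map_id d.items]
  apply List.map_congr_left
  intro p hp
  by_cases hk : p.1 = k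
  · have : (k, p.2) ∈ d.items := by rw [← hk]; exact hp
    have hv := PySem.Dict.getD_of_mem_items d this h []
    simp [hk, hv, Prod.ext_iff]
  · simp [hk]

-- A's per-name update equals the set-grouping update on a dict with distinct keys
theorem pv_step_eq (d : PySem.Dict String (List String)) (name : String) (h : d.keys.Nodup) :
    pvStepA d name = pvStepSet d name := by
  unfold pvStepA pvStepSet pvSplit PySem.Dict.modify PySem.Set.add PySem.Set.contains
  by_cases hc : d.contains (PySem.Str.slice name (some (PySem.Str.rfind name " " + 1)) none) = true
  · simp only [hc, if_true]
    by_cases hf : (d.getD (PySem.Str.slice name (some (PySem.Str.rfind name " " + 1)) none) []).contains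
        (PySem.Str.slice name none (some (PySem.Str.rfind name " "))) = true
    · simp only [hf, if_true]
      exact (pv_insert_getD_self d _ h hc).symm
    · simp only [hf, if_false, Bool.false_eq_true]
  · have hc' : d.contains (PySem.Str.slice name (some (PySem.Str.rfind name " " + 1)) none) = false := by
      simpa using hc
    simp only [hc', if_false, Bool.false_eq_true]
    rw [PySem.Dict.getD_insert_self, PySem.Dict.getD_of_not_contains d _ hc']
    simp [PySem.Dict.insert_insert_self]

theorem pv_step_nodup (d : PySem.Dict String (List String)) (name : String) (h : d.keys.Nodup) :
    (pvStepSet d name).keys.Nodup := by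
  unfold pvStepSet PySem.Dict.modify
  exact PySem.Dict.nodup_keys_insert d _ _ h

theorem pv_fold_eq (names : List String) (d : PySem.Dict String (List String)) (h : d.keys.Nodup) :
    names.foldl pvStepA d = names.foldl pvStepSet d ∧ (names.foldl pvStepSet d).keys.Nodup := by
  induction names generalizing d with
  | nil => exact ⟨rfl, h⟩
  | cons n ns ih =>
    simp only [List.foldl_cons, pv_step_eq d n h]
    exact ih (pvStepSet d n) (pv_step_nodup d n h)

-- a modify-loop over distinct keys all present in the dict maps f over exactly those entries
theorem pv_modify_fold (f : List String → List String) (ks : List String) :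
    ∀ (d : PySem.Dict String (List String)), d.keys.Nodup → ks.Nodup →
    (∀ k ∈ ks, d.contains k = true) →
    (ks.foldl (fun d k => d.modify k [] f) d).items
      = d.items.map (fun p => if p.1 ∈ ks then (p.1, f p.2) else p) := by
  induction ks with
  | nil => intro d _ _ _; simp
  | cons k ks ih =>
    intro d hnd hks hmem
    have hck : d.contains k = true := hmem k (List.mem_cons_self ..)
    have h1 : (d.modify k [] f).items = d.items.map (fun p => if p.1 = k then (p.1, f p.2) else p) := by
      unfold PySem.Dict.modify
      rw [PySem.Dict.items_insert_of_contains d _ hck]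
      apply List.map_congr_left
      intro p hp
      by_cases hk : p.1 = k
      · have : (k, p.2) ∈ d.items := by rw [← hk]; exact hp
        have hv := PySem.Dict.getD_of_mem_items d this hnd []
        simp [hk, hv]
      · simp [hk]
    have hnd1 : (d.modify k [] f).keys.Nodup := by
      unfold PySem.Dict.modify; exact PySem.Dict.nodup_keys_insert d _ _ hnd
    have hmem1 : ∀ k' ∈ ks, (d.modify k [] f).contains k' = true := by
      intro k' hk'
      rw [PySem.Dict.contains_modify]
      simp [hmem k' (List.mem_cons_of_mem _ hk')]
    have hkks : k ∉ ks := (List.nodup_cons.mp hks).1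
    rw [List.foldl_cons, ih (d.modify k [] f) hnd1 (List.nodup_cons.mp hks).2 hmem1, h1, List.map_map]
    apply List.map_congr_left
    intro p _
    by_cases hk : p.1 = k
    · simp [Function.comp, hk, hkks]
    · by_cases hin : p.1 ∈ ks <;> simp [Function.comp, hk, hin]

-- sorting every value in place over the dict's own keys = mapping sort over the items
theorem pv_sort_loop (d : PySem.Dict String (List String)) (h : d.keys.Nodup) :
    (d.keys.foldl (fun d last => d.modify last [] (fun l => PySem.List.sorted l (fun x => x) false)) d).items
      = d.items.map (fun pr => (pr.1, PySem.List.sorted pr.2 (fun x => x) false)) := by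
  rw [pv_modify_fold _ d.keys d h h (fun k hk => (PySem.Dict.contains_iff_mem_keys d k).mpr hk)]
  apply List.map_congr_left
  intro p hp
  simp [PySem.Dict.mem_keys_of_mem_items d hp]

-- values of the set-grouping fold
theorem pv_G_getD (ns : List String) (d : PySem.Dict String (List String)) (L : String) :
    (ns.foldl pvStepSet d).getD L []
      = (pvFirsts L (ns.map pvSplit)).foldl PySem.Set.add (d.getD L []) := by
  induction ns generalizing d with
  | nil => simp [pvFirsts]
  | cons n ns ih =>
    rw [List.foldl_cons, ih]
    by_cases h : (pvSplit n).1 = L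
    · simp [pvFirsts, pvStepSet, h]
    · simp [pvFirsts, pvStepSet, PySem.Dict.getD_modify, h, Ne.symm h]

theorem pv_A_char (pf : List (String × List String)) :
    get_last_to_first pf
      = (PySem.Set.ofList ((pvPairs pf).map Prod.fst)).map
          (fun L => (L, PySem.List.sorted (PySem.Set.ofList (pvFirsts L (pvPairs pf))) (fun x => x) false)) := by
  unfold get_last_to_first
  rw [pv_flatten_foldl]
  obtain ⟨he, hnd⟩ := pv_fold_eq (pvNames pf) PySem.Dict.empty (by simp)
  rw [he, pv_sort_loop _ hnd]
  have hkeys : ((pvNames pf).foldl pvStepSet PySem.Dict.empty).keys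
      = PySem.Set.ofList ((pvPairs pf).map Prod.fst) := by
    have := PySem.Dict.keys_foldl_modify_key (pvNames pf) (fun n => (pvSplit n).1) []
      (fun _ n s => PySem.Set.add s (pvSplit n).2) PySem.Dict.empty
    rw [show (fun (d : PySem.Dict String (List String)) (n : String) =>
          d.modify (pvSplit n).1 [] ((fun _ n s => PySem.Set.add s (pvSplit n).2) d n)) = pvStepSet
        from by funext d n; rfl] at this
    rw [this, PySem.Set.update_eq_foldl]
    simp [pvPairs, PySem.Dict.keys]
    rfl
  rw [PySem.Dict.items_eq_map_keys _ hnd [], List.map_map, hkeys]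
  apply List.map_congr_left
  intro L _
  simp only [Function.comp]
  rw [pv_G_getD, PySem.Dict.getD_empty]
  rfl

-- ---- B-side characterisation ----

-- B's pair-collection loop builds exactly (pvNames pf).map pvSplit
theorem pv_pairs_foldl (pf : List (String × List String)) :
    pf.foldl (fun acc pr => (pr.2 ++ [pr.1]).foldl (fun a n => a ++ [pvSplit n]) acc) []
      = pvPairs pf := by
  unfold pvPairs pvNames
  rw [show (fun (acc : List String) (pr : String × List String) => (acc ++ pr.2) ++ [pr.1])
        = fun acc pr => acc ++ (pr.2 ++ [pr.1]) from by funext a p; simp]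
  rw [PySem.List.foldl_append_eq_flatMap, List.nil_append, List.map_flatMap]
  rw [show (fun (acc : List (String × String)) (pr : String × List String) =>
        (pr.2 ++ [pr.1]).foldl (fun a n => a ++ [pvSplit n]) acc)
      = fun acc pr => acc ++ (pr.2 ++ [pr.1]).map pvSplit from by
    funext a p; rw [PySem.List.foldl_append_singleton_eq_map]]
  rw [PySem.List.foldl_append_eq_flatMap, List.nil_append]

-- Python's sorted on (string, string) tuples is sorted with the lexicographic key
theorem pv_lt_bool (a b : String × String) :
    (decide (a.1 < b.1) || (!decide (b.1 < a.1) && decide (a.2 < b.2)))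
      = decide ((toLex a : Lex (String × String)) < toLex b) := by
  by_cases h1 : a.1 < b.1
  · simp [h1, Prod.Lex.lt_iff]
  · by_cases h2 : b.1 < a.1
    · have hne : a.1 ≠ b.1 := ne_of_gt h2
      simp [h1, h2, Prod.Lex.lt_iff, hne]
    · have heq : a.1 = b.1 := le_antisymm (not_lt.mp h2) (not_lt.mp h1)
      by_cases h3 : a.2 < b.2 <;> simp [h3, Prod.Lex.lt_iff, heq]

theorem pv_sorted2_eq (ps : List (String × String)) :
    PySem.List.sorted2 ps Prod.fst Prod.snd false
      = PySem.List.sorted ps (fun p => (toLex p : Lex (String × String))) false := by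
  unfold PySem.List.sorted2 PySem.List.sorted
  simp only [if_neg (by simp : ¬ (false = true))]
  rw [show (fun (a b : String × String) =>
        decide (a.1 < b.1) || (!decide (b.1 < a.1) && decide (a.2 < b.2)))
      = fun a b => decide ((toLex a : Lex (String × String)) < toLex b) from by
    funext a b; exact pv_lt_bool a b]

-- the prev-skip fold appends exactly the pvKept pairs
theorem pv_fold_prev (sp : List (String × String)) :
    ∀ (d : PySem.Dict String (List String)) (prev : Option (String × String)),
    (sp.foldl pvStepPrev (d, prev)).1
      = (pvKept prev sp).foldl (fun d p => d.modify p.1 [] (fun l => l ++ [p.2])) d := by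
  induction sp with
  | nil => intro d prev; rfl
  | cons p ps ih =>
    intro d prev
    by_cases h : some p = prev
    · simp [pvKept, pvStepPrev, h, ih]
    · simp [pvKept, pvStepPrev, h, ih]

-- seeding values are all [], so every getD with default [] is []
theorem pv_d0_getD (ps : List (String × String)) (L : String) :
    ∀ (d : PySem.Dict String (List String)), d.getD L [] = [] →
    (ps.foldl (fun d p => d.insert p.1 ([] : List String)) d).getD L [] = [] := by
  induction ps with
  | nil => intro d h; exact h
  | cons p ps ih =>
    intro d h
    rw [List.foldl_cons]
    apply ih
    rw [PySem.Dict.getD_insert]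
    split_ifs <;> simp [h]

-- updating a set with elements it already has changes nothing
theorem pv_update_self (xs : List String) :
    ∀ (s : PySem.Set String), (∀ x ∈ xs, x ∈ s) → s.update xs = s := by
  induction xs with
  | nil => intro s _; rw [PySem.Set.update_eq_foldl]; rfl
  | cons x xs ih =>
    intro s h
    rw [PySem.Set.update_eq_foldl, List.foldl_cons,
      PySem.Set.add_of_mem (h x (List.mem_cons_self ..)), ← PySem.Set.update_eq_foldl]
    exact ih s (fun y hy => h y (List.mem_cons_of_mem _ hy))

-- membership of pvFirsts
theorem pv_mem_firsts (L x : String) (ps : List (String × String)) :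
    x ∈ pvFirsts L ps ↔ (L, x) ∈ ps := by
  unfold pvFirsts
  simp only [List.mem_map, List.mem_filter, beq_iff_eq]
  constructor
  · rintro ⟨⟨a, b⟩, ⟨hm, h1⟩, h2⟩
    simp only at h1 h2
    rw [← h1, ← h2]; exact hm
  · intro hm; exact ⟨(L, x), ⟨hm, rfl⟩, rfl⟩

-- membership of pvKept on a sorted run
theorem pv_kept_mem (sp : List (String × String)) :
    ∀ (prev : Option (String × String)),
    sp.Pairwise (fun a b => (toLex a : Lex (String × String)) ≤ toLex b) →
    (∀ x ∈ sp, ∀ q, prev = some q → (toLex q : Lex (String × String)) ≤ toLex x) →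
    ∀ x, x ∈ pvKept prev sp ↔ (x ∈ sp ∧ some x ≠ prev) := by
  induction sp with
  | nil => intro prev _ _ x; simp [pvKept]
  | cons p ps ih =>
    intro prev hpw hprev x
    have hhead : ∀ y ∈ ps, (toLex p : Lex (String × String)) ≤ toLex y :=
      (List.pairwise_cons.mp hpw).1
    have htail := (List.pairwise_cons.mp hpw).2
    by_cases h : some p = prev
    · rw [pvKept, if_pos h,
        ih prev htail (fun y hy q hq => hprev y (List.mem_cons_of_mem _ hy) q hq) x]
      constructor
      · rintro ⟨hm, hne⟩; exact ⟨List.mem_cons_of_mem _ hm, hne⟩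
      · rintro ⟨hm, hne⟩
        rcases List.mem_cons.mp hm with rfl | hm'
        · exact absurd h hne
        · exact ⟨hm', hne⟩
    · rw [pvKept, if_neg h]
      have ihp := ih (some p) htail
        (fun y hy q hq => by rw [Option.some_inj.mp hq.symm]; exact hhead y hy)
      constructor
      · intro hx
        rcases List.mem_cons.mp hx with rfl | hx'
        · exact ⟨List.mem_cons_self .., fun hc => h hc⟩
        · obtain ⟨hm, hnp⟩ := ((ihp x).mp hx')
          refine ⟨List.mem_cons_of_mem _ hm, ?_⟩
          intro hc
          rcases prev with _ | q
          · exact absurd hc (by simp)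
          · have hq : x = q := Option.some_inj.mp hc
            have h1 : (toLex q : Lex (String × String)) ≤ toLex p :=
              hprev p (List.mem_cons_self ..) q rfl
            have h2 : (toLex p : Lex (String × String)) ≤ toLex x := hhead x hm
            rw [hq] at h2
            have : p = q := toLex_inj.mp (le_antisymm h2 h1)
            exact hnp (by rw [hq, this])
      · rintro ⟨hm, hne⟩
        rcases List.mem_cons.mp hm with rfl | hm'
        · exact List.mem_cons_self ..
        · by_cases hxp : x = p
          · rw [hxp]; exact List.mem_cons_self ..
          · exact List.mem_cons_of_mem _ ((ihp x).mpr ⟨hm', by simpa using hxp⟩)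

-- pvKept of a sorted run is strictly increasing
theorem pv_kept_pairwise (sp : List (String × String)) :
    ∀ (prev : Option (String × String)),
    sp.Pairwise (fun a b => (toLex a : Lex (String × String)) ≤ toLex b) →
    (∀ x ∈ sp, ∀ q, prev = some q → (toLex q : Lex (String × String)) ≤ toLex x) →
    (pvKept prev sp).Pairwise (fun a b => (toLex a : Lex (String × String)) < toLex b) := by
  induction sp with
  | nil => intro prev _ _; simp [pvKept]
  | cons p ps ih =>
    intro prev hpw hprev
    have hhead : ∀ y ∈ ps, (toLex p : Lex (String × String)) ≤ toLex y :=
      (List.pairwise_cons.mp hpw).1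
    have htail := (List.pairwise_cons.mp hpw).2
    by_cases h : some p = prev
    · rw [pvKept, if_pos h]
      exact ih prev htail (fun y hy q hq => hprev y (List.mem_cons_of_mem _ hy) q hq)
    · rw [pvKept, if_neg h]
      have hcond : ∀ y ∈ ps, ∀ q, (some p : Option (String × String)) = some q →
          (toLex q : Lex (String × String)) ≤ toLex y :=
        fun y hy q hq => by rw [Option.some_inj.mp hq.symm]; exact hhead y hy
      refine List.pairwise_cons.mpr ⟨?_, ih (some p) htail hcond⟩
      intro y hy
      obtain ⟨hm, hnp⟩ := (pv_kept_mem ps (some p) htail hcond y).mp hy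
      exact lt_of_le_of_ne (hhead y hm) (fun hc => hnp (by rw [toLex_inj.mp hc]))

theorem pv_B_char (pf : List (String × List String)) :
    get_last_to_first_alt pf
      = (PySem.Set.ofList ((pvPairs pf).map Prod.fst)).map
          (fun L => (L, pvFirsts L (pvKept none
            (PySem.List.sorted (pvPairs pf) (fun p => (toLex p : Lex (String × String))) false)))) := by
  unfold get_last_to_first_alt
  simp only [pv_pairs_foldl, pv_sorted2_eq]
  rw [pv_fold_prev]
  have hd0keys : ((pvPairs pf).foldl (fun d p => d.insert p.1 ([] : List String)) PySem.Dict.empty).keys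
      = PySem.Set.ofList ((pvPairs pf).map Prod.fst) := by
    have := PySem.Dict.keys_foldl_insert_key (pvPairs pf) Prod.fst
      (fun (_ : PySem.Dict String (List String)) (_ : String × String) => ([] : List String))
      PySem.Dict.empty
    rw [show (fun (d : PySem.Dict String (List String)) (p : String × String) =>
          d.insert p.1 ((fun _ _ => ([] : List String)) d p)) = fun d p => d.insert p.1 [] from rfl] at this
    rw [this, PySem.Set.update_eq_foldl]
    simp [PySem.Dict.keys]
    rfl
  have hd0nodup : ((pvPairs pf).foldl (fun d p => d.insert p.1 ([] : List String)) PySem.Dict.empty).keys.Nodup := by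
    rw [hd0keys]; exact PySem.Set.nodup_ofList _
  set sp := PySem.List.sorted (pvPairs pf) (fun p => (toLex p : Lex (String × String))) false with hsp
  set d0 := (pvPairs pf).foldl (fun d p => d.insert p.1 ([] : List String)) PySem.Dict.empty with hd0
  have hfinkeys : ((pvKept none sp).foldl (fun d p => d.modify p.1 [] (fun l => l ++ [p.2])) d0).keys
      = PySem.Set.ofList ((pvPairs pf).map Prod.fst) := by
    have := PySem.Dict.keys_foldl_modify_key (pvKept none sp) Prod.fst []
      (fun (_ : PySem.Dict String (List String)) (p : String × String) (l : List String) => l ++ [p.2]) d0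
    rw [show (fun (d : PySem.Dict String (List String)) (p : String × String) =>
          d.modify p.1 [] ((fun _ p l => l ++ [p.2]) d p))
        = fun d p => d.modify p.1 [] (fun l => l ++ [p.2]) from rfl] at this
    rw [this, hd0keys]
    apply pv_update_self
    intro x hx
    obtain ⟨q, hq, hq1⟩ := List.mem_map.mp hx
    have hmemsp : q ∈ pvPairs pf := by
      have hkm := pv_kept_mem sp none (PySem.List.sorted_pairwise _ _) (by simp) q
      have := (hkm.mp hq).1
      rw [hsp] at this
      exact (PySem.List.mem_sorted _ _ _ _).mp this
    rw [PySem.Set.mem_ofList]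
    exact List.mem_map.mpr ⟨q, hmemsp, hq1⟩
  have hfinnodup : ((pvKept none sp).foldl (fun d p => d.modify p.1 [] (fun l => l ++ [p.2])) d0).keys.Nodup := by
    rw [hfinkeys]; exact PySem.Set.nodup_ofList _
  rw [PySem.Dict.items_eq_map_keys _ hfinnodup [], hfinkeys]
  apply List.map_congr_left
  intro L _
  rw [PySem.Dict.getD_foldl_modify_append, pv_d0_getD _ _ _ (PySem.Dict.getD_empty _ _)]
  rfl

-- ---- the per-key equality ----

theorem pv_key (ps : List (String × String)) (L : String) :
    PySem.List.sorted (PySem.Set.ofList (pvFirsts L ps)) (fun x => x) false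
      = pvFirsts L (pvKept none (PySem.List.sorted ps (fun p => (toLex p : Lex (String × String))) false)) := by
  set sp := PySem.List.sorted ps (fun p => (toLex p : Lex (String × String))) false with hsp
  have hpw : sp.Pairwise (fun a b => (toLex a : Lex (String × String)) ≤ toLex b) :=
    PySem.List.sorted_pairwise _ _
  have hmem := pv_kept_mem sp none hpw (by simp)
  have hkpw := pv_kept_pairwise sp none hpw (by simp)
  -- the target list is strictly increasing
  have hys : (pvFirsts L (pvKept none sp)).Pairwise (· < ·) := by
    unfold pvFirsts
    rw [List.pairwise_map]
    apply List.pairwise_filter.mpr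
    refine hkpw.imp ?_
    intro a b hab ha hb
    have ha' : a.1 = L := beq_iff_eq.mp ha
    have hb' : b.1 = L := beq_iff_eq.mp hb
    rcases Prod.Lex.lt_iff.mp hab with h1 | ⟨_, h2⟩
    · simp only [ofLex_toLex] at h1
      rw [ha', hb'] at h1
      exact absurd h1 (lt_irrefl L)
    · simpa using h2
  have hysnd : (pvFirsts L (pvKept none sp)).Nodup := hys.imp ne_of_lt
  apply PySem.List.sorted_eq_of_perm_of_pairwise_lt
  · apply (List.perm_ext_iff_of_nodup hysnd (PySem.Set.nodup_ofList _)).mpr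
    intro x
    rw [pv_mem_firsts, PySem.Set.mem_ofList, pv_mem_firsts, hmem (L, x), hsp,
      PySem.List.mem_sorted]
    simp
  · exact hys

-- ===== VERDICT (by name: the statement is the Claim_ definition above) =====
theorem get_last_to_first_spec : Claim_equal_get_last_to_first := by
  intro pf _
  unfold Spec_get_last_to_first
  rw [pv_A_char, pv_B_char]
  apply List.map_congr_left
  intro L _
  rw [pv_key]
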